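-- pv_equiv track=rewrite | github.com/ethereum/web3.py | web3/middleware/filter.py | gen_bounded_segments
-- ===== SOURCE A (Python) =====
-- from typing import (
--     TYPE_CHECKING,
--     Any,
--     Callable,
--     Dict,
--     Iterable,
--     Iterator,
--     List,
--     Optional,
--     Tuple,
--     Union,
--     cast,
-- )
--
-- def gen_bounded_segments(start: int, stop: int, step: int) -> Iterable[Tuple[int, int]]:
--     #  If the initial range is less than the step
--     #  just return (start, stop)
--     if start + step >= stop:
--         yield (start, stop)
--         return
--     for segment in zip(
--         range(start, stop - step + 1, step), range(start + step, stop + 1, step)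
--     ):
--         yield segment
--
--     remainder = (stop - start) % step
--     #  Handle the remainder
--     if remainder:
--         yield (stop - remainder, stop)
-- ===== SOURCE B (Python) =====
-- def gen_bounded_segments(start, stop, step):
--     if start + step >= stop:
--         yield (start, stop)
--         return
--     # Build the boundary list once (every segment start, then stop as the final
--     # cap) and pair each boundary with its successor.
--     bounds = list(range(start, stop, step))
--     bounds.append(stop)
--     yield from zip(bounds, bounds[1:])
-- ===== Notes on version B (the rewrite author's own statement) =====
-- stated objective: simpler
-- what changed: Replaces the zip of two parallel shifted ranges plus a separate modulo-remainder branch with one boundary list (range(start,stop,step) with stop appended) whose consecutive entries are paired; the remainder segment falls out of the appended cap instead of a % computation.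
-- outside the precondition, e.g. on gen_bounded_segments(0, 10, -3): A returns [(12, 10)], B returns []
import Mathlib
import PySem

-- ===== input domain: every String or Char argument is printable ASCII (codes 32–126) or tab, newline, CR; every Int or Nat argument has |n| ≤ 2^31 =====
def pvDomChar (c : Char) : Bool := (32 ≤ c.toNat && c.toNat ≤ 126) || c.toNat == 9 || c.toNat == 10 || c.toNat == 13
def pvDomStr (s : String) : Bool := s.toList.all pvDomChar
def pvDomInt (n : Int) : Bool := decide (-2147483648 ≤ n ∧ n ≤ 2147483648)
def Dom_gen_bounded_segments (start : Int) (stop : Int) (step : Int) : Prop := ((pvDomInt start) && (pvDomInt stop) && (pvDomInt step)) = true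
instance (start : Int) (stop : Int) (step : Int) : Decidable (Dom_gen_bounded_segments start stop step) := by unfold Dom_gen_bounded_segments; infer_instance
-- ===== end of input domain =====

-- B replaces A's zip of two parallel shifted ranges plus a modulo-remainder branch by one
-- boundary list (range plus an appended stop cap) whose consecutive entries are paired
-- (objective: simpler); equal return values on Pre_ (positive step, or degenerate range).

-- ===== PORT A =====
def gen_bounded_segments (start : Int) (stop : Int) (step : Int) : List (Int × Int) :=
  if start + step ≥ stop then [(start, stop)]
  else
    let segs := List.zip (PySem.List.pyRange start (stop - step + 1) step)
                         (PySem.List.pyRange (start + step) (stop + 1) step)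
    let remainder := PySem.Int.mod (stop - start) step
    segs ++ (if remainder ≠ 0 then [(stop - remainder, stop)] else [])

-- ===== PORT B =====
def gen_bounded_segments_alt (start : Int) (stop : Int) (step : Int) : List (Int × Int) :=
  if start + step ≥ stop then [(start, stop)]
  else
    let bounds := PySem.List.pyRange start stop step ++ [stop]
    List.zip bounds (PySem.List.slice bounds (some 1) none)

-- ===== PRECONDITION & SPEC =====
-- Pre_ excludes step = 0 with start + step < stop (A raises ValueError via range) and negative
-- step with start ≤ stop and (stop - start) % step ≠ 0, where A's remainder branch returns an
-- accidental segment past stop (e.g. (12, 10)) that B's empty boundary list does not produce.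
def Pre_gen_bounded_segments (start : Int) (stop : Int) (step : Int) : Prop :=
  0 < step ∨ start + step ≥ stop ∨
    (step < 0 ∧ (stop < start ∨ PySem.Int.mod (stop - start) step = 0))
instance (start : Int) (stop : Int) (step : Int) : Decidable (Pre_gen_bounded_segments start stop step) := by unfold Pre_gen_bounded_segments; infer_instance

def pvWitness_gen_bounded_segments : Int × Int × Int := (0, 10, 3)

def Spec_gen_bounded_segments (start : Int) (stop : Int) (step : Int) (out : List (Int × Int)) : Prop := out = gen_bounded_segments_alt start stop step
instance (start : Int) (stop : Int) (step : Int) (out : List (Int × Int)) : Decidable (Spec_gen_bounded_segments start stop step out) := by unfold Spec_gen_bounded_segments; infer_instance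

-- ===== CLAIM (what is proved, stated in full; the proofs are below) =====
def Claim_equal_gen_bounded_segments : Prop := ∀ (start : Int) (stop : Int) (step : Int), Dom_gen_bounded_segments start stop step → Pre_gen_bounded_segments start stop step → Spec_gen_bounded_segments start stop step (gen_bounded_segments start stop step)

-- ===== LEMMAS AND PROOFS =====

-- range(a, b, s) with positive step, nonempty case: peel the head
theorem pyRange_pos_cons (a b s : Int) (hs : 0 < s) (hab : a < b) :
    PySem.List.pyRange a b s = a :: PySem.List.pyRange (a + s) b s := by
  rw [PySem.List.pyRange_of_pos _ _ hs, PySem.List.pyRange_of_pos _ _ hs]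
  have h2 : (b - a + s - 1) / s = (b - a - 1) / s + 1 := by
    have h1 : b - a + s - 1 = (b - a - 1) + 1 * s := by ring
    rw [h1, Int.add_mul_ediv_right _ _ (by omega)]
  have hz : 0 ≤ (b - a - 1) / s := Int.ediv_nonneg (by omega) (by omega)
  have hcount2 : (if a + s < b then ((b - (a + s) + s - 1) / s).toNat else 0)
      = ((b - a - 1) / s).toNat := by
    split
    · have : b - (a + s) + s - 1 = b - a - 1 := by ring
      rw [this]
    · have h0 : (b - a - 1) / s = 0 := Int.ediv_eq_zero_of_lt (by omega) (by omega)
      omega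
  rw [if_pos hab, h2, hcount2]
  have hn : ((b - a - 1) / s + 1).toNat = ((b - a - 1) / s).toNat + 1 := by omega
  rw [hn, List.range_succ_eq_map, List.map_cons, List.map_map]
  refine List.cons_eq_cons.mpr ⟨by simp, ?_⟩
  apply List.map_congr_left
  intro k _
  simp [Function.comp]
  ring

-- range(a, b, s) with positive step, empty case
theorem pyRange_pos_nil (a b s : Int) (hs : 0 < s) (hab : b ≤ a) :
    PySem.List.pyRange a b s = [] := by
  rw [PySem.List.pyRange_of_pos _ _ hs, if_neg (by omega)]
  simp

-- A's tail (zip of the two ranges plus remainder segment), as a function of the cursor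
def aTail (stop s c : Int) : List (Int × Int) :=
  List.zip (PySem.List.pyRange c (stop - s + 1) s) (PySem.List.pyRange (c + s) (stop + 1) s)
    ++ (if PySem.Int.mod (stop - c) s ≠ 0 then [(stop - PySem.Int.mod (stop - c) s, stop)] else [])

theorem aTail_base (stop s c : Int) (hs : 0 < s) (hc : c < stop) (hstop : stop ≤ c + s) :
    aTail stop s c = [(c, stop)] := by
  unfold aTail
  by_cases heq : stop = c + s
  · have h1 : PySem.List.pyRange c (stop - s + 1) s
        = c :: PySem.List.pyRange (c + s) (stop - s + 1) s := pyRange_pos_cons _ _ _ hs (by omega)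
    rw [h1, pyRange_pos_nil (c + s) (stop - s + 1) s hs (by omega),
        pyRange_pos_cons (c + s) (stop + 1) s hs (by omega)]
    have hsc : stop - c = s := by omega
    rw [hsc]
    have hm : PySem.Int.mod s s = 0 := by
      rw [PySem.Int.mod_eq_zero_iff_dvd]
    simp [hm, heq]
  · rw [pyRange_pos_nil c (stop - s + 1) s hs (by omega)]
    have hm : PySem.Int.mod (stop - c) s = stop - c := by
      rw [PySem.Int.mod_eq_emod_of_pos hs]
      exact Int.emod_eq_of_lt (by omega) (by omega)
    have hne : stop - c ≠ 0 := by omega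
    simp [hm, hne]

theorem aTail_cons (stop s c : Int) (hs : 0 < s) (h : c + s < stop) :
    aTail stop s c = (c, c + s) :: aTail stop s (c + s) := by
  unfold aTail
  rw [pyRange_pos_cons c (stop - s + 1) s hs (by omega),
      pyRange_pos_cons (c + s) (stop + 1) s hs (by omega)]
  have hm : PySem.Int.mod (stop - c) s = PySem.Int.mod (stop - (c + s)) s := by
    rw [PySem.Int.mod_eq_emod_of_pos hs, PySem.Int.mod_eq_emod_of_pos hs]
    have : stop - (c + s) = (stop - c) - s := by ring
    rw [this, Int.sub_emod_right]
  rw [List.zip_cons_cons, hm]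
  rfl

-- B's tail (boundary list paired with its own tail), as a function of the cursor
def bTail (stop s c : Int) : List (Int × Int) :=
  let bs := PySem.List.pyRange c stop s ++ [stop]
  List.zip bs bs.tail

theorem bTail_base (stop s c : Int) (hs : 0 < s) (hc : c < stop) (hstop : stop ≤ c + s) :
    bTail stop s c = [(c, stop)] := by
  unfold bTail
  rw [pyRange_pos_cons c stop s hs hc, pyRange_pos_nil (c + s) stop s hs hstop]
  rfl

theorem bTail_cons (stop s c : Int) (hs : 0 < s) (h : c + s < stop) :
    bTail stop s c = (c, c + s) :: bTail stop s (c + s) := by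
  unfold bTail
  rw [pyRange_pos_cons c stop s hs (by omega), pyRange_pos_cons (c + s) stop s hs h]
  rfl

theorem bTail_eq_aTail (stop s : Int) (hs : 0 < s) :
    ∀ (fuel : Nat) (c : Int), (stop - c - s).toNat ≤ fuel → c + s < stop →
      bTail stop s c = aTail stop s c := by
  intro fuel
  induction fuel with
  | zero => intro c hf h; omega
  | succ n ih =>
    intro c hf h
    rw [bTail_cons stop s c hs h, aTail_cons stop s c hs h]
    by_cases h2 : c + s + s < stop
    · rw [ih (c + s) (by omega) h2]
    · rw [bTail_base stop s (c + s) hs (by omega) (by omega),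
          aTail_base stop s (c + s) hs (by omega) (by omega)]

-- negative step: a divisor cannot divide a strictly smaller-magnitude nonzero value
theorem not_dvd_between (s x : Int) (h1 : s < x) (h2 : x < 0) : ¬ s ∣ x := by
  intro hdvd
  have h3 : (-s) ∣ (-x) := (neg_dvd).mpr ((dvd_neg).mpr hdvd)
  have := Int.le_of_dvd (by omega : (0:Int) < -x) h3
  omega

-- Python's % with a negative divisor fixes a value already lying in (s, 0)
theorem pymod_between (x s : Int) (h1 : s < x) (h2 : x < 0) : PySem.Int.mod x s = x := by
  unfold PySem.Int.mod
  have hndvd : ¬ s ∣ x := not_dvd_between s x h1 h2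
  have key : x % (-s) = x - s := by
    conv_lhs => rw [show x = (x - s) + (-s) * (-1) from by ring]
    rw [Int.add_mul_emod_self_left]
    exact Int.emod_eq_of_lt (by omega) (by omega)
  have hemod : x % s = x - s := by
    have h4 := Int.emod_neg x (-s)
    simp only [neg_neg] at h4
    rw [h4, key]
  rw [Int.fmod_eq_emod, if_neg (by intro h; rcases h with h | h; omega; exact hndvd h), hemod]
  ring

-- range with negative step: empty when a ≤ b
theorem pyRange_neg_nil (a b s : Int) (hs : s < 0) (hab : a ≤ b) :
    PySem.List.pyRange a b s = [] := by
  unfold PySem.List.pyRange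
  simp only [if_neg (by omega : ¬ s = 0), if_neg (by omega : ¬ 0 < s),
             if_neg (by omega : ¬ b < a)]
  simp

-- range with negative step: singleton when b < a and one step overshoots b
theorem pyRange_neg_one (a b s : Int) (hs : s < 0) (hba : b < a) (hover : a + s < b) :
    PySem.List.pyRange a b s = [a] := by
  have hcount : ((a - b + -s - 1) / -s).toNat = 1 := by
    have hle : (1:Int) ≤ (a - b + -s - 1) / -s :=
      (Int.le_ediv_iff_mul_le (by omega)).mpr (by omega)
    have hlt : (a - b + -s - 1) / -s < 2 :=
      (Int.ediv_lt_iff_lt_mul (by omega)).mpr (by omega)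
    omega
  unfold PySem.List.pyRange
  simp only [if_neg (by omega : ¬ s = 0), if_neg (by omega : ¬ 0 < s), if_pos hba]
  rw [hcount]
  simp [List.range_succ]

-- ===== VERDICT (by name: the statement is the Claim_ definition above) =====
theorem gen_bounded_segments_spec : Claim_equal_gen_bounded_segments := by
  intro start stop step _ hpre
  unfold Spec_gen_bounded_segments gen_bounded_segments gen_bounded_segments_alt
  by_cases hg : start + step ≥ stop
  · rw [if_pos hg, if_pos hg]
  · rw [if_neg hg, if_neg hg]
    simp only [PySem.List.slice_from_one]
    show aTail stop step start = bTail stop step start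
    rcases hpre with hs | hguard | ⟨hneg, hcase⟩
    · exact (bTail_eq_aTail stop step hs (stop - start).toNat start (by omega) (by omega)).symm
    · exact absurd hguard hg
    · have hfst : PySem.List.pyRange start (stop - step + 1) step = [] :=
        pyRange_neg_nil _ _ _ hneg (by omega)
      rcases hcase with hlt | hmod
      · -- stop < start: both return the single segment (start, stop)
        have hmodv : PySem.Int.mod (stop - start) step = stop - start :=
          pymod_between _ _ (by omega) (by omega)
        have hA : aTail stop step start = [(start, stop)] := by
          unfold aTail
          rw [hfst, hmodv, if_pos (by omega : stop - start ≠ 0)]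
          have h5 : stop - (stop - start) = start := by ring
          rw [h5]
          rfl
        have hB : bTail stop step start = [(start, stop)] := by
          unfold bTail
          rw [pyRange_neg_one start stop step hneg hlt (by omega)]
          rfl
        rw [hA, hB]
      · -- step divides stop - start: both return []
        have hle : start ≤ stop := by
          by_contra hc
          rw [pymod_between _ _ (by omega) (by omega)] at hmod
          omega
        have hA : aTail stop step start = [] := by
          unfold aTail
          rw [hfst, hmod]
          simp
        have hB : bTail stop step start = [] := by
          unfold bTail
          rw [pyRange_neg_nil start stop step hneg hle]
          rfl
        rw [hA, hB]
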